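-- pv_equiv track=rewrite | github.com/dhimanparas20/Morning-Mailer | modules/ipython_startup.py | _find_user_by_identifier
-- ===== SOURCE A (Python) =====
-- def _find_user_by_identifier(users, identifier):
--     """Find a user by keyword, email, or mobile number."""
--     user = next((u for u in users if u.get("keyword") == identifier), None)
--     if user:
--         return user
--     user = next((u for u in users if u.get("email", "").lower() == identifier.lower()), None)
--     if user:
--         return user
--     user = next((u for u in users if u.get("mobile", "") == identifier), None)
--     return user
-- ===== SOURCE B (Python) =====
-- def _find_user_by_identifier(users, identifier):
--     """Find a user by keyword, email, or mobile number (single pass)."""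
--     email_match = None
--     mobile_match = None
--     for u in users:
--         if u.get("keyword") == identifier:
--             return u
--         if email_match is None and u.get("email", "").lower() == identifier.lower():
--             email_match = u
--         if mobile_match is None and u.get("mobile", "") == identifier:
--             mobile_match = u
--     return email_match if email_match is not None else mobile_match
-- ===== Notes on version B (the rewrite author's own statement) =====
-- stated objective: alternative
-- what changed: Replaced A's three sequential scans (three generator passes with next) by one single pass that returns immediately on a keyword match and records the first email and first mobile match in two slots; it trades the repeated scans for two accumulator variables.
-- outside the precondition, e.g. on _find_user_by_identifier([{'email': 'a'}, {}], ''): A returns {'email': 'a'}, B returns {}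
import Mathlib
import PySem

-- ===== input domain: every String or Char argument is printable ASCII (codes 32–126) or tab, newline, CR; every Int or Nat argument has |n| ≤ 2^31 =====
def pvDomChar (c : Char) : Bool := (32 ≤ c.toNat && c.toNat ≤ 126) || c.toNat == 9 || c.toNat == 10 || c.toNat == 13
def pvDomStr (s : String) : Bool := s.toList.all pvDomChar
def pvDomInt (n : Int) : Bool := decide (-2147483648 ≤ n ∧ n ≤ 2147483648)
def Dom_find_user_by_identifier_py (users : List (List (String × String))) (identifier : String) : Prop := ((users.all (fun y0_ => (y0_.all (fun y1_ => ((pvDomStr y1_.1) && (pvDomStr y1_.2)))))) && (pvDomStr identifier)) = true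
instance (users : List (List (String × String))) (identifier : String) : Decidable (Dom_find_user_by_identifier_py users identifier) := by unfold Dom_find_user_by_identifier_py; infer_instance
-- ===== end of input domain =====

-- B makes ONE pass over `users` (early return on a keyword match, two slots for the
-- first email and first mobile match) instead of A's three sequential scans.

-- shared helpers: dict.get on an association list (first match), as in both Pythons
def pvGet? (u : List (String × String)) (k : String) : Option String :=
  (u.find? (fun p => p.1 == k)).map (·.2)

def pvGetD (u : List (String × String)) (k d : String) : String :=
  (pvGet? u k).getD d

-- the three membership tests, verbatim from the Python source (both versions use the same tests)
def pvKw (identifier : String) (u : List (String × String)) : Bool :=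
  pvGet? u "keyword" == some identifier

def pvEm (identifier : String) (u : List (String × String)) : Bool :=
  PySem.Str.lower (pvGetD u "email" "") == PySem.Str.lower identifier

def pvMob (identifier : String) (u : List (String × String)) : Bool :=
  pvGetD u "mobile" "" == identifier

-- ===== PORT A =====
-- Python truthiness of `user` (None or a dict): true iff it is a non-empty dict
def pvTruthy (o : Option (List (String × String))) : Bool :=
  match o with
  | some u => !u.isEmpty
  | none => false

def find_user_by_identifier_py (users : List (List (String × String))) (identifier : String) : Option (List (String × String)) :=
  let user := users.find? (pvKw identifier)
  if pvTruthy user then user else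
  let user2 := users.find? (pvEm identifier)
  if pvTruthy user2 then user2 else
  users.find? (pvMob identifier)

-- ===== PORT B =====
def pvLoop (identifier : String) :
    List (List (String × String)) → Option (List (String × String)) → Option (List (String × String)) → Option (List (String × String))
  | [], em, mm => if em.isSome then em else mm
  | u :: rest, em, mm =>
    if pvKw identifier u then some u
    else
      pvLoop identifier rest
        (if em.isNone && pvEm identifier u then some u else em)
        (if mm.isNone && pvMob identifier u then some u else mm)

def find_user_by_identifier_py_alt (users : List (List (String × String))) (identifier : String) : Option (List (String × String)) :=
  pvLoop identifier users none none

-- ===== PRECONDITION & SPEC =====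
-- Pre_ excludes only the degenerate inputs with an empty identifier AND an empty user dict in the
-- list: there A's fall-through between passes hinges on Python's falsiness of the empty dict
-- (`if user:`), an accidental corner no caller would specify, and B keeps the first email match.
def Pre_find_user_by_identifier_py (users : List (List (String × String))) (identifier : String) : Prop :=
  ¬ (identifier = "" ∧ [] ∈ users)
instance (users : List (List (String × String))) (identifier : String) : Decidable (Pre_find_user_by_identifier_py users identifier) := by unfold Pre_find_user_by_identifier_py; infer_instance

def pvWitness_find_user_by_identifier_py : (List (List (String × String))) × String :=
  ([[("keyword", "k")], [("email", "A")]], "k")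

def Spec_find_user_by_identifier_py (users : List (List (String × String))) (identifier : String) (out : Option (List (String × String))) : Prop := out = find_user_by_identifier_py_alt users identifier
instance (users : List (List (String × String))) (identifier : String) (out : Option (List (String × String))) : Decidable (Spec_find_user_by_identifier_py users identifier out) := by unfold Spec_find_user_by_identifier_py; infer_instance

-- ===== CLAIM (what is proved, stated in full; the proofs are below) =====
def Claim_equal_find_user_by_identifier_py : Prop := ∀ (users : List (List (String × String))) (identifier : String), Dom_find_user_by_identifier_py users identifier → Pre_find_user_by_identifier_py users identifier → Spec_find_user_by_identifier_py users identifier (find_user_by_identifier_py users identifier)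

-- ===== LEMMAS AND PROOFS =====

-- characterisation of B's single pass in terms of A's three scans
theorem pvLoop_eq (identifier : String) (users : List (List (String × String)))
    (em mm : Option (List (String × String))) :
    pvLoop identifier users em mm =
      match users.find? (pvKw identifier) with
      | some u => some u
      | none =>
        match em with
        | some e => some e
        | none =>
          match users.find? (pvEm identifier) with
          | some u => some u
          | none =>
            match mm with
            | some m => some m
            | none => users.find? (pvMob identifier) := by
  induction users generalizing em mm with
  | nil => cases em <;> cases mm <;> simp [pvLoop]
  | cons u rest ih =>
    by_cases hk : pvKw identifier u
    · simp [pvLoop, hk]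
    · rw [pvLoop, if_neg hk, ih]
      by_cases he : pvEm identifier u <;> by_cases hm : pvMob identifier u <;>
        cases em <;> cases mm <;>
        simp [hk, he, hm]

theorem pvEm_nil_imp (identifier : String) (h : pvEm identifier [] = true) : identifier = "" := by
  simp only [pvEm, pvGetD, pvGet?, List.find?_nil, Option.map_none, Option.getD_none] at h
  have hl : (PySem.Str.lower identifier).toList = [] := by
    have := beq_iff_eq.mp h
    rw [← this]
    simp [PySem.Str.toList_lower, PySem.Chars.lower]
  rw [PySem.Str.toList_lower] at hl
  cases hid : identifier.toList with
  | nil => simpa using hid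
  | cons c cs => rw [hid] at hl; simp [PySem.Chars.lower] at hl

-- ===== VERDICT (by name: the statement is the Claim_ definition above) =====
theorem find_user_by_identifier_py_spec : Claim_equal_find_user_by_identifier_py := by
  intro users identifier _ hpre
  unfold Spec_find_user_by_identifier_py find_user_by_identifier_py_alt find_user_by_identifier_py
  rw [pvLoop_eq]
  cases hkw : users.find? (pvKw identifier) with
  | some u =>
    have hp : pvKw identifier u = true := List.find?_some hkw
    have hne : u ≠ [] := by
      intro h; subst h
      simp [pvKw, pvGet?] at hp
    simp [pvTruthy, hne]
  | none =>
    simp only [pvTruthy]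
    cases hem : users.find? (pvEm identifier) with
    | some u =>
      have hp : pvEm identifier u = true := List.find?_some hem
      have hmem : u ∈ users := List.mem_of_find?_eq_some hem
      have hne : u ≠ [] := by
        intro h; subst h
        exact hpre ⟨pvEm_nil_imp identifier hp, hmem⟩
      simp [hne]
    | none => simp
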